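-- pv_equiv track=rewrite | github.com/vamsi198/ai-code-assistant | backend/utils.py | count_lines_of_code
-- ===== SOURCE A (Python) =====
-- def count_lines_of_code(code: str) -> dict:
--     """
--     Count different types of lines in code
--     """
--     lines = code.split('\n')
--
--     total_lines = len(lines)
--     blank_lines = sum(1 for line in lines if not line.strip())
--     comment_lines = sum(1 for line in lines if line.strip().startswith('#'))
--     code_lines = total_lines - blank_lines - comment_lines
--
--     return {
--         'total': total_lines,
--         'code': code_lines,
--         'comments': comment_lines,
--         'blank': blank_lines
--     }
-- ===== SOURCE B (Python) =====
-- def count_lines_of_code(code: str) -> dict: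
--     """
--     Count different types of lines in code
--     """
--     lines = code.split('\n')
--     blank = comments = code_n = 0
--     for line in lines:
--         s = line.strip()
--         if not s:
--             blank += 1
--         elif s.startswith('#'):
--             comments += 1
--         else:
--             code_n += 1
--     return {
--         'total': len(lines),
--         'code': code_n,
--         'comments': comments,
--         'blank': blank
--     }
-- ===== Notes on version B (the rewrite author's own statement) =====
-- stated objective: alternative
-- what changed: Replaces A's three separate passes (two generator-sum scans plus a subtraction for code lines) with a single classifying loop that strips each line once and maintains blank/comment/code counters directly.
import Mathlib
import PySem

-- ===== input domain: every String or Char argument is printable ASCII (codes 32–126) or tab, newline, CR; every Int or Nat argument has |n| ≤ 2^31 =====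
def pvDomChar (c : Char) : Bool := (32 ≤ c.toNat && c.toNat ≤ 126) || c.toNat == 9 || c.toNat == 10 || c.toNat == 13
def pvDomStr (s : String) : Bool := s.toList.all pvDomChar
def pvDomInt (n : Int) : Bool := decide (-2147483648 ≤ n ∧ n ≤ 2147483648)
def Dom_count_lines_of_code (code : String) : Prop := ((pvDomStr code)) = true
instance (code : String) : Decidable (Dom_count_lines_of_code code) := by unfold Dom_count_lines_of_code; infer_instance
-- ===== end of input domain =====

-- B replaces A's three separate counting passes by one single-pass classifying loop; same result, proved equal.


-- ===== PORT A =====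
def count_lines_of_code (code : String) : List (String × Int) :=
  let lines := (PySem.Str.split? code "\n").getD []
  let total_lines : Int := lines.length
  let blank_lines : Int :=
    lines.foldl (fun acc line => if PySem.Str.strip line == "" then acc + 1 else acc) 0
  let comment_lines : Int :=
    lines.foldl (fun acc line => if PySem.Str.startswith (PySem.Str.strip line) "#" then acc + 1 else acc) 0
  let code_lines : Int := total_lines - blank_lines - comment_lines
  [("total", total_lines), ("code", code_lines), ("comments", comment_lines), ("blank", blank_lines)]

-- ===== PORT B =====
def clocLoop : List String → Int → Int → Int → Int × Int × Int
  | [], blank, comments, code_n => (blank, comments, code_n)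
  | line :: rest, blank, comments, code_n =>
    let s := PySem.Str.strip line
    if s == "" then clocLoop rest (blank + 1) comments code_n
    else if PySem.Str.startswith s "#" then clocLoop rest blank (comments + 1) code_n
    else clocLoop rest blank comments (code_n + 1)

def count_lines_of_code_alt (code : String) : List (String × Int) :=
  let lines := (PySem.Str.split? code "\n").getD []
  let (blank, comments, code_n) := clocLoop lines 0 0 0
  [("total", (lines.length : Int)), ("code", code_n), ("comments", comments), ("blank", blank)]

-- ===== PRECONDITION & SPEC =====
def Spec_count_lines_of_code (code : String) (out : List (String × Int)) : Prop := out = count_lines_of_code_alt code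
instance (code : String) (out : List (String × Int)) : Decidable (Spec_count_lines_of_code code out) := by unfold Spec_count_lines_of_code; infer_instance

-- ===== CLAIM (what is proved, stated in full; the proofs are below) =====
def Claim_equal_count_lines_of_code : Prop := ∀ (code : String), Dom_count_lines_of_code code → Spec_count_lines_of_code code (count_lines_of_code code)

-- ===== LEMMAS AND PROOFS =====

-- a conditional-sum fold counts exactly the lines satisfying the predicate
theorem foldl_count_if (p : String → Bool) :
    ∀ (ls : List String) (b : Int),
      ls.foldl (fun acc line => if p line then acc + 1 else acc) b = b + (ls.countP p : Int) := by
  intro ls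
  induction ls with
  | nil => simp
  | cons hd tl ih =>
    intro b
    by_cases h : p hd = true <;> simp [List.foldl, List.countP_cons, h, ih] <;> ring

-- a line with empty strip cannot start with '#'
theorem blank_not_hash (line : String) (h : (PySem.Str.strip line == "") = true) :
    PySem.Str.startswith (PySem.Str.strip line) "#" = false := by
  rw [eq_of_beq h]
  decide

theorem clocLoop_spec :
    ∀ (ls : List String) (b c k : Int),
      clocLoop ls b c k =
        (b + (ls.countP (fun l => PySem.Str.strip l == "") : Int),
         c + (ls.countP (fun l => PySem.Str.startswith (PySem.Str.strip l) "#") : Int),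
         k + ((ls.length : Int)
              - (ls.countP (fun l => PySem.Str.strip l == "") : Int)
              - (ls.countP (fun l => PySem.Str.startswith (PySem.Str.strip l) "#") : Int))) := by
  intro ls
  induction ls with
  | nil => simp [clocLoop]
  | cons hd tl ih =>
    intro b c k
    by_cases hb : (PySem.Str.strip hd == "") = true
    · have hh := blank_not_hash hd hb
      simp only [clocLoop, hb, if_true, ih, List.countP_cons, hh, List.length_cons]
      refine Prod.ext ?_ (Prod.ext ?_ ?_) <;> simp <;> push_cast <;> ring
    · by_cases hs : PySem.Str.startswith (PySem.Str.strip hd) "#" = true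
      · simp only [clocLoop, hb, if_false, hs, if_true, ih, List.countP_cons, List.length_cons]
        refine Prod.ext ?_ (Prod.ext ?_ ?_) <;> simp [hb, hs] <;> push_cast <;> ring
      · simp only [clocLoop, hb, if_false, hs, ih, List.countP_cons, List.length_cons]
        refine Prod.ext ?_ (Prod.ext ?_ ?_) <;> simp [hb, hs] <;> push_cast <;> ring

-- ===== VERDICT (by name: the statement is the Claim_ definition above) =====
theorem count_lines_of_code_spec : Claim_equal_count_lines_of_code := by
  intro code _
  unfold Spec_count_lines_of_code count_lines_of_code count_lines_of_code_alt
  simp only [foldl_count_if, clocLoop_spec, zero_add]
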